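-- pv_equiv track=rewrite | github.com/mmwf22/greenbot | seed_pattern_generator.py | calculate_seed_pattern
-- ===== SOURCE A (Python) =====
-- def calculate_seed_pattern(bed_width, bed_height, plant_data):
--     grid = [['_' for _ in range(bed_width)] for _ in range(bed_height)]
--
--     current_row = 0
--     for plant in plant_data:
--         name, plant_spacing, row_spacing = plant
--         plant_spacing = int(plant_spacing)
--         row_spacing = int(row_spacing)
--
--         # Fill rows with the current plant type
--         for _ in range(row_spacing):
--             if current_row >= bed_height:
--                 break
--
--             for col in range(0, bed_width, plant_spacing):
--                 grid[current_row][col] = name[:2]  # Display first two letters of plant name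
--
--             current_row += 1
--
--             if current_row >= bed_height:
--                 break
--
--     return grid
-- ===== SOURCE B (Python) =====
-- def calculate_seed_pattern(bed_width, bed_height, plant_data):
--     # Phase 1: one pass over plant_data deciding which plant owns which row.
--     row_assignments = []
--     for name, plant_spacing, row_spacing in plant_data:
--         plant_spacing = int(plant_spacing)
--         row_spacing = int(row_spacing)
--         take = min(row_spacing, bed_height - len(row_assignments))
--         row_assignments += [(name[:2], plant_spacing)] * max(take, 0)
--     # Phase 2: build each assigned row directly, then pad with blank rows.
--     grid = []
--     for label, spacing in row_assignments:
--         row = ['_'] * bed_width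
--         for col in range(0, bed_width, spacing):
--             row[col] = label
--         grid.append(row)
--     for _ in range(max(bed_height, 0) - len(row_assignments)):
--         grid.append(['_'] * bed_width)
--     return grid
-- ===== Notes on version B (the rewrite author's own statement) =====
-- stated objective: alternative
-- what changed: B splits A's interleaved nested loops over a mutable grid into two phases: one pass over plant_data assigning each grid row its (label, spacing), then building each row directly from blanks and padding with blank rows, with no cursor state or break logic.
import Mathlib
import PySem

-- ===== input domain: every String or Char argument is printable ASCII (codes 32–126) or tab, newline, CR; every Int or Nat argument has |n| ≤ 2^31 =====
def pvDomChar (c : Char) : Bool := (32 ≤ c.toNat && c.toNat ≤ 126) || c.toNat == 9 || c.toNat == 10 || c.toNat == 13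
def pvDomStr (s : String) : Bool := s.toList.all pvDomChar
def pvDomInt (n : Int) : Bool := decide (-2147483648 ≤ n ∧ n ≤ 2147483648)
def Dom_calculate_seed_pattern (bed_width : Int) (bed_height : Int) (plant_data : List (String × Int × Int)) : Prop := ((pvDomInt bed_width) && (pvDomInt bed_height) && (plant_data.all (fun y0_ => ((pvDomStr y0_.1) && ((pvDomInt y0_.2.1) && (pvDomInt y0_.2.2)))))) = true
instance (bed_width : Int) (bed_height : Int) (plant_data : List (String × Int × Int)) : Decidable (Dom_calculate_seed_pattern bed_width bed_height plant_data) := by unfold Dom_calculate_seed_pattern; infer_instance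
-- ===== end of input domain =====

-- B builds the grid in two phases (assign rows to plants, then render each row directly)
-- instead of A's interleaved nested loops over a mutable grid; objective: alternative decomposition
-- (same cost). Return-value equivalence only: neither version mutates its arguments.

-- ===== PORT A =====
-- inner loop 'for col in range(0, bed_width, plant_spacing): grid[current_row][col] = name[:2]'
-- (col is nonnegative on every admitted input, so 'col.toNat' is exact there)
def pvFillRowA (bed_width plant_spacing : Int) (label : String) (row : List String) : List String :=
  (PySem.List.pyRange 0 bed_width plant_spacing).foldl (fun r col => r.set col.toNat label) row

-- the 'for _ in range(row_spacing)' loop with both break checks; range(row_spacing) runs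
-- row_spacing.toNat times (0 for negative row_spacing, exactly as range)
def pvRowsLoopA (bed_width bed_height plant_spacing : Int) (label : String) :
    Nat → List (List String) × Int → List (List String) × Int
  | 0, st => st
  | Nat.succ n, (grid, cur) =>
    if bed_height ≤ cur then (grid, cur)
    else
      let grid' := grid.set cur.toNat (pvFillRowA bed_width plant_spacing label (grid.getD cur.toNat []))
      let cur' := cur + 1
      if bed_height ≤ cur' then (grid', cur')
      else pvRowsLoopA bed_width bed_height plant_spacing label n (grid', cur')

-- name[:2] is ported as the first two characters (exact for a [0:2] slice)
def calculate_seed_pattern (bed_width : Int) (bed_height : Int) (plant_data : List (String × Int × Int)) : List (List String) :=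
  let grid0 := (PySem.List.pyRange 0 bed_height 1).map (fun _ => (PySem.List.pyRange 0 bed_width 1).map (fun _ => "_"))
  (plant_data.foldl (fun st p =>
      pvRowsLoopA bed_width bed_height p.2.1 (String.ofList (p.1.toList.take 2)) p.2.2.toNat st)
    (grid0, 0)).1

-- ===== PORT B =====
-- phase 1: '[(name[:2], plant_spacing)] * max(take, 0)' appended per plant ('max take 0 → toNat' is exact)
def pvAssignB (bed_height : Int) (plant_data : List (String × Int × Int)) : List (String × Int) :=
  plant_data.foldl (fun acc p =>
    acc ++ List.replicate (min p.2.2 (bed_height - (acc.length : Int))).toNat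
             (String.ofList (p.1.toList.take 2), p.2.1)) []

-- phase 2 row builder: row = ['_'] * bed_width; for col in range(0, bed_width, spacing): row[col] = label
def pvRowB (bed_width : Int) (label : String) (spacing : Int) : List String :=
  (PySem.List.pyRange 0 bed_width spacing).foldl (fun row col => row.set col.toNat label)
    (List.replicate bed_width.toNat "_")

def calculate_seed_pattern_alt (bed_width : Int) (bed_height : Int) (plant_data : List (String × Int × Int)) : List (List String) :=
  let assigns := pvAssignB bed_height plant_data
  assigns.map (fun a => pvRowB bed_width a.1 a.2)
    ++ List.replicate (bed_height.toNat - assigns.length) (List.replicate bed_width.toNat "_")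

-- ===== PRECONDITION & SPEC =====
-- rows claimed by the plants strictly before index i (each contributes max(row_spacing, 0) rows)
def pvPrefixRows (plant_data : List (String × Int × Int)) (i : Nat) : Int :=
  ((plant_data.take i).map (fun p => max p.2.2 0)).sum

-- Pre_ excludes exactly the inputs on which the Python A raises: a plant that actually gets at
-- least one row while its plant_spacing is 0 (ValueError from range step 0) or its plant_spacing
-- is negative with a negative bed_width (range yields negative columns into an empty row: IndexError).
def Pre_calculate_seed_pattern (bed_width : Int) (bed_height : Int) (plant_data : List (String × Int × Int)) : Prop :=
  ∀ i, i < plant_data.length →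
    ((plant_data.getD i ("", 0, 0)).2.1 = 0 ∨
      ((plant_data.getD i ("", 0, 0)).2.1 < 0 ∧ bed_width < 0)) →
    ((plant_data.getD i ("", 0, 0)).2.2 < 1 ∨ bed_height ≤ pvPrefixRows plant_data i)

instance (bed_width : Int) (bed_height : Int) (plant_data : List (String × Int × Int)) : Decidable (Pre_calculate_seed_pattern bed_width bed_height plant_data) := by unfold Pre_calculate_seed_pattern; infer_instance

def pvWitness_calculate_seed_pattern : Int × Int × (List (String × Int × Int)) :=
  (3, 2, [("tomato", 2, 1), ("kale", 1, 3)])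

def Spec_calculate_seed_pattern (bed_width : Int) (bed_height : Int) (plant_data : List (String × Int × Int)) (out : List (List String)) : Prop := out = calculate_seed_pattern_alt bed_width bed_height plant_data
instance (bed_width : Int) (bed_height : Int) (plant_data : List (String × Int × Int)) (out : List (List String)) : Decidable (Spec_calculate_seed_pattern bed_width bed_height plant_data out) := by unfold Spec_calculate_seed_pattern; infer_instance

-- ===== CLAIM (what is proved, stated in full; the proofs are below) =====
def Claim_equal_calculate_seed_pattern : Prop := ∀ (bed_width : Int) (bed_height : Int) (plant_data : List (String × Int × Int)), Dom_calculate_seed_pattern bed_width bed_height plant_data → Pre_calculate_seed_pattern bed_width bed_height plant_data → Spec_calculate_seed_pattern bed_width bed_height plant_data (calculate_seed_pattern bed_width bed_height plant_data)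

-- ===== LEMMAS AND PROOFS =====

theorem pvFillRowA_blank (bw ps : Int) (label : String) :
    pvFillRowA bw ps label (List.replicate bw.toNat "_") = pvRowB bw label ps := rfl

-- A's inner row loop, characterised: starting from rendered prefix R followed by m blank rows
-- (m = remaining capacity), it renders min n m more rows and advances the cursor by that much.
theorem pvRowsLoopA_spec (bw bh ps : Int) (label : String) :
    ∀ (n : Nat) (R : List (List String)) (m : Nat),
      m = bh.toNat - R.length → R.length ≤ bh.toNat →
      pvRowsLoopA bw bh ps label n
        (R ++ List.replicate m (List.replicate bw.toNat "_"), (R.length : Int)) =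
      (R ++ List.replicate (min n m) (pvRowB bw label ps)
          ++ List.replicate (m - min n m) (List.replicate bw.toNat "_"),
        (R.length : Int) + (min n m : Nat)) := by
  intro n
  induction n with
  | zero =>
    intro R m hm hle
    simp [pvRowsLoopA]
  | succ n ih =>
    intro R m hm hle
    by_cases hbr : bh ≤ (R.length : Int)
    · have hm0 : m = 0 := by omega
      subst hm0
      simp [pvRowsLoopA, hbr]
    · have hm1 : 1 ≤ m := by omega
      obtain ⟨m', rfl⟩ : ∃ m', m = m' + 1 := ⟨m - 1, by omega⟩
      have hget : (R ++ List.replicate (m' + 1) (List.replicate bw.toNat "_")).getD R.length [] =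
          List.replicate bw.toNat "_" := by
        rw [List.getD_append_right _ _ _ _ (le_refl _)]
        simp [List.replicate_succ]
      have hset : (R ++ List.replicate (m' + 1) (List.replicate bw.toNat "_")).set R.length
            (pvRowB bw label ps) =
          (R ++ [pvRowB bw label ps]) ++ List.replicate m' (List.replicate bw.toNat "_") := by
        rw [List.set_append_right _ _ (le_refl _)]
        simp [List.replicate_succ]
      by_cases hbr2 : bh ≤ (R.length : Int) + 1
      · have hm'0 : m' = 0 := by omega
        subst hm'0
        simp only [pvRowsLoopA, if_neg hbr, Int.toNat_natCast, hget, pvFillRowA_blank, hset,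
          if_pos hbr2]
        simp
      · have hstep : pvRowsLoopA bw bh ps label (n + 1)
            (R ++ List.replicate (m' + 1) (List.replicate bw.toNat "_"), (R.length : Int)) =
            pvRowsLoopA bw bh ps label n
              ((R ++ [pvRowB bw label ps]) ++ List.replicate m' (List.replicate bw.toNat "_"),
                (R.length : Int) + 1) := by
          simp only [pvRowsLoopA, if_neg hbr, Int.toNat_natCast, hget, pvFillRowA_blank, hset,
            if_neg hbr2]
        rw [hstep]
        have hlen : ((R ++ [pvRowB bw label ps]).length : Int) = (R.length : Int) + 1 := by simp
        rw [← hlen]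
        rw [ih (R ++ [pvRowB bw label ps]) m' (by simp; omega) (by simp; omega)]
        have h1 : min (n + 1) (m' + 1) = min n m' + 1 := by omega
        rw [h1]
        have h2 : (m' + 1) - (min n m' + 1) = m' - min n m' := by omega
        rw [h2]
        simp only [Prod.mk.injEq]
        constructor
        · simp [List.replicate_succ, List.append_assoc]
        · simp only [List.length_append, List.length_cons, List.length_nil]; push_cast; omega

-- A's fold over the plants, starting from any rendered assignment prefix, lands exactly on
-- B's two-phase result for the extended assignment list.
theorem pvFoldA_spec (bw bh : Int) :
    ∀ (pd : List (String × Int × Int)) (acc : List (String × Int)),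
      acc.length ≤ bh.toNat →
      (pd.foldl (fun st p =>
          pvRowsLoopA bw bh p.2.1 (String.ofList (p.1.toList.take 2)) p.2.2.toNat st)
        (acc.map (fun a => pvRowB bw a.1 a.2)
            ++ List.replicate (bh.toNat - acc.length) (List.replicate bw.toNat "_"),
          (acc.length : Int))) =
      ((pd.foldl (fun acc p =>
          acc ++ List.replicate (min p.2.2 (bh - (acc.length : Int))).toNat
                   (String.ofList (p.1.toList.take 2), p.2.1)) acc).map (fun a => pvRowB bw a.1 a.2)
           ++ List.replicate (bh.toNat - (pd.foldl (fun acc p =>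
          acc ++ List.replicate (min p.2.2 (bh - (acc.length : Int))).toNat
                   (String.ofList (p.1.toList.take 2), p.2.1)) acc).length) (List.replicate bw.toNat "_"),
         ((pd.foldl (fun acc p =>
          acc ++ List.replicate (min p.2.2 (bh - (acc.length : Int))).toNat
                   (String.ofList (p.1.toList.take 2), p.2.1)) acc).length : Int)) := by
  intro pd
  induction pd with
  | nil => intro acc hle; simp
  | cons p pd ih =>
    intro acc hle
    simp only [List.foldl_cons]
    have hloop := pvRowsLoopA_spec bw bh p.2.1 (String.ofList (p.1.toList.take 2)) p.2.2.toNat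
        (acc.map (fun a => pvRowB bw a.1 a.2)) (bh.toNat - acc.length)
        (by simp) (by simp [hle])
    simp only [List.length_map] at hloop
    rw [hloop]
    have ht : min p.2.2.toNat (bh.toNat - acc.length)
        = (min p.2.2 (bh - (acc.length : Int))).toNat := by omega
    have hmap : acc.map (fun a => pvRowB bw a.1 a.2)
          ++ List.replicate (min p.2.2.toNat (bh.toNat - acc.length))
               (pvRowB bw (String.ofList (p.1.toList.take 2)) p.2.1)
        = (acc ++ List.replicate (min p.2.2 (bh - (acc.length : Int))).toNat
             (String.ofList (p.1.toList.take 2), p.2.1)).map (fun a => pvRowB bw a.1 a.2) := by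
      rw [ht]; simp [List.map_replicate]
    have hlen' : (acc ++ List.replicate (min p.2.2 (bh - (acc.length : Int))).toNat
          (String.ofList (p.1.toList.take 2), p.2.1)).length
        = acc.length + (min p.2.2 (bh - (acc.length : Int))).toNat := by simp
    have hrest : (bh.toNat - acc.length) - min p.2.2.toNat (bh.toNat - acc.length)
        = bh.toNat - (acc ++ List.replicate (min p.2.2 (bh - (acc.length : Int))).toNat
            (String.ofList (p.1.toList.take 2), p.2.1)).length := by rw [hlen']; omega
    have hcur : (acc.length : Int) + (min p.2.2.toNat (bh.toNat - acc.length) : Nat)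
        = ((acc ++ List.replicate (min p.2.2 (bh - (acc.length : Int))).toNat
            (String.ofList (p.1.toList.take 2), p.2.1)).length : Int) := by
      rw [hlen']; push_cast [ht]; ring
    rw [hmap, hrest, hcur]
    exact ih _ (by rw [hlen']; omega)

theorem map_const_replicate {α : Type} (l : List α) (s : String) :
    l.map (fun _ => s) = List.replicate l.length s := List.map_const' ..

-- ===== VERDICT (by name: the statement is the Claim_ definition above) =====
theorem calculate_seed_pattern_spec : Claim_equal_calculate_seed_pattern := by
  intro bw bh pd _ _
  have hgrid0 : (PySem.List.pyRange 0 bh 1).map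
        (fun _ => (PySem.List.pyRange 0 bw 1).map (fun _ => "_")) =
      List.replicate bh.toNat (List.replicate bw.toNat "_") := by
    simp only [map_const_replicate, PySem.List.length_pyRange_one]
    norm_num
  have h := pvFoldA_spec bw bh pd [] (by simp)
  simp only [List.map_nil, List.length_nil, Nat.sub_zero, List.nil_append, Nat.cast_zero] at h
  simp only [Spec_calculate_seed_pattern, calculate_seed_pattern, calculate_seed_pattern_alt,
    pvAssignB]
  rw [hgrid0, h]
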